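-- pv_equiv track=rewrite | github.com/ericmerle3789/Collatz-Junction-Theorem | scripts/research/r57_base_k2_maxNr.py | compute_Nr_via_delta
-- ===== SOURCE A (Python) =====
-- from collections import defaultdict, Counter
--
-- def compute_Nr_via_delta(M, g, p):
--     """Reformulation via delta = b - a. Returns the same Nr dict."""
--     Nr = Counter()
--     for delta in range(M + 1):
--         c_delta = (1 + g * pow(2, delta, p)) % p
--         if c_delta == 0:
--             # 2^a * 0 = 0 mod p for all a in [0, M-delta]
--             Nr[0] += (M - delta + 1)
--         else:
--             for a in range(M - delta + 1):
--                 r = (pow(2, a, p) * c_delta) % p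
--                 Nr[r] += 1
--     return Nr
-- ===== SOURCE B (Python) =====
-- from collections import Counter
--
-- def compute_Nr_via_delta(M, g, p):
--     """Same Nr Counter, via one table of powers of 2 mod p with cycle detection:
--     bulk-counts whole residue classes of a per delta instead of recomputing
--     pow(2, a, p) for every pair (a, delta)."""
--     Nr = {}
--     get = Nr.get
--     if M < 0:
--         return Counter(Nr)
--     # powers of 2 mod p with cycle detection: P[a] = pow(2, a, p) for a < len(P)
--     P = []
--     first = {}
--     x = 1 % p
--     s = t = None
--     for a in range(M + 1):
--         if x in first:
--             s = first[x]
--             t = a - s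
--             break
--         first[x] = a
--         P.append(x)
--         x = (x * 2) % p
--     L = len(P)
--     for delta in range(M + 1):
--         c = P[delta] if delta < L else P[s + (delta - s) % t]
--         c = (1 + g * c) % p
--         K = M - delta
--         if c == 0:
--             Nr[0] = get(0, 0) + K + 1
--             continue
--         J = min(K, L - 1)
--         if t is None:
--             for a in range(J + 1):
--                 r = P[a] * c % p
--                 Nr[r] = get(r, 0) + 1
--         else:
--             for a in range(min(J + 1, s)):
--                 r = P[a] * c % p
--                 Nr[r] = get(r, 0) + 1
--             for a in range(s, J + 1):
--                 r = P[a] * c % p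
--                 Nr[r] = get(r, 0) + (K - a) // t + 1
--     return Counter(Nr)
-- ===== Notes on version B (the rewrite author's own statement) =====
-- stated objective: faster
-- what changed: B precomputes the powers of 2 mod p once with cycle detection (orbit prefix + period) and, per delta, adds whole residue-class multiplicities ((K-a)//t+1) over one preperiod+period window instead of A's per-delta loop recomputing pow(2,a,p) for every exponent a.
import Mathlib
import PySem

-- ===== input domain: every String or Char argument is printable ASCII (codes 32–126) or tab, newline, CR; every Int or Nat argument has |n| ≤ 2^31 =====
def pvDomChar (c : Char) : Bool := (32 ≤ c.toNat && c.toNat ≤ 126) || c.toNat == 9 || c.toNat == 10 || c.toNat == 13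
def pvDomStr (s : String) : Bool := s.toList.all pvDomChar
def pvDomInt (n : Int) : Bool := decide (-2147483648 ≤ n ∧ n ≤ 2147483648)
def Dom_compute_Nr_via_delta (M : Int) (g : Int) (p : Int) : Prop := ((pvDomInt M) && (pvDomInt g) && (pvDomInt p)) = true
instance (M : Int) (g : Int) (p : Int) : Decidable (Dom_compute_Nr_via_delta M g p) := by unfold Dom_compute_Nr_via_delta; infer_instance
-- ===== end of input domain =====

-- B replaces A's per-pair pow(2,a,p) recomputation by one table of powers of 2 mod p with
-- cycle detection, counting each whole residue class of exponents at once (measured faster).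

-- ===== PORT A =====
def compute_Nr_via_delta (M : Int) (g : Int) (p : Int) : List (Int × Int) :=
  ((PySem.List.pyRange 0 (M+1) 1).foldl (fun Nr delta =>
      let c := PySem.Int.mod (1 + g * PySem.Int.powMod 2 delta.toNat p) p
      if c == 0 then
        Nr.modify 0 0 (· + (M - delta + 1))
      else
        (PySem.List.pyRange 0 (M - delta + 1) 1).foldl
          (fun Nr a => Nr.modify (PySem.Int.mod (PySem.Int.powMod 2 a.toNat p * c) p) 0 (· + 1)) Nr)
    (PySem.Dict.empty : PySem.Dict Int Int)).items

-- ===== PORT B =====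
def compute_Nr_via_delta_alt (M : Int) (g : Int) (p : Int) : List (Int × Int) :=
  if M < 0 then [] else
  -- powers of 2 mod p with cycle detection (the 'for a in range(M+1): … break' loop;
  -- the Option in the state is (s, t) once found, and plays the role of the break)
  let res := (PySem.List.pyRange 0 (M+1) 1).foldl (fun stt a =>
      let P := stt.1; let first := stt.2.1; let x := stt.2.2.1; let st := stt.2.2.2
      if st.isSome then stt
      else match first.get? x with
        | some s => (P, first, x, some (s, a - s))
        | none => (P ++ [x], first.insert x a, PySem.Int.mod (x * 2) p, none))
    (([] : List Int), (PySem.Dict.empty : PySem.Dict Int Int), PySem.Int.mod 1 p,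
      (none : Option (Int × Int)))
  let P := res.1
  let st := res.2.2.2
  let L := PySem.List.len P
  ((PySem.List.pyRange 0 (M+1) 1).foldl (fun Nr delta =>
      let c1 := if delta < L then PySem.List.pyGetD P delta 0
                else match st with
                  | some st' => PySem.List.pyGetD P (st'.1 + PySem.Int.mod (delta - st'.1) st'.2) 0
                  | none => 0   -- dead: st = none forces L = M+1 > delta
      let c := PySem.Int.mod (1 + g * c1) p
      let K := M - delta
      if c == 0 then Nr.modify 0 0 (· + K + 1)
      else
        let J := min K (L - 1)
        match st with
        | none =>
          (PySem.List.pyRange 0 (J + 1) 1).foldl (fun Nr a =>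
            Nr.modify (PySem.Int.mod (PySem.List.pyGetD P a 0 * c) p) 0 (· + 1)) Nr
        | some st' =>
          let Nr1 := (PySem.List.pyRange 0 (min (J + 1) st'.1) 1).foldl (fun Nr a =>
            Nr.modify (PySem.Int.mod (PySem.List.pyGetD P a 0 * c) p) 0 (· + 1)) Nr
          (PySem.List.pyRange st'.1 (J + 1) 1).foldl (fun Nr a =>
            Nr.modify (PySem.Int.mod (PySem.List.pyGetD P a 0 * c) p) 0
              (· + PySem.Int.floordiv (K - a) st'.2 + 1)) Nr1)
    (PySem.Dict.empty : PySem.Dict Int Int)).items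

-- ===== PRECONDITION & SPEC =====
-- Pre_ excludes exactly p = 0 with M ≥ 0, where A raises ValueError (pow with modulus 0)
-- and B raises ZeroDivisionError (1 % 0).
def Pre_compute_Nr_via_delta (M : Int) (g : Int) (p : Int) : Prop := M < 0 ∨ p ≠ 0
instance (M : Int) (g : Int) (p : Int) : Decidable (Pre_compute_Nr_via_delta M g p) := by
  unfold Pre_compute_Nr_via_delta; infer_instance
def pvWitness_compute_Nr_via_delta : Int × Int × Int := (5, 3, 7)

def Spec_compute_Nr_via_delta (M : Int) (g : Int) (p : Int) (out : List (Int × Int)) : Prop := out = compute_Nr_via_delta_alt M g p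
instance (M : Int) (g : Int) (p : Int) (out : List (Int × Int)) : Decidable (Spec_compute_Nr_via_delta M g p out) := by unfold Spec_compute_Nr_via_delta; infer_instance

-- ===== CLAIM (what is proved, stated in full; the proofs are below) =====
def Claim_equal_compute_Nr_via_delta : Prop := ∀ (M : Int) (g : Int) (p : Int), Dom_compute_Nr_via_delta M g p → Pre_compute_Nr_via_delta M g p → Spec_compute_Nr_via_delta M g p (compute_Nr_via_delta M g p)

-- ===== LEMMAS AND PROOFS =====

theorem pvDvdBound {p z : Int} (hp : p ≠ 0) (h : p ∣ z) (hb : |z| < |p|) : z = 0 := by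
  rcases h with ⟨k, rfl⟩
  rcases eq_or_ne k 0 with rfl | hk
  · simp
  · exfalso
    have h1 : |p| * 1 ≤ |p| * |k| := by
      have : (1 : Int) ≤ |k| := Int.one_le_abs (by omega)
      exact mul_le_mul_of_nonneg_left this (abs_nonneg p)
    rw [abs_mul] at hb
    omega

theorem pvModCongr {p a b : Int} (hp : p ≠ 0) (h : p ∣ a - b) :
    PySem.Int.mod a p = PySem.Int.mod b p := by
  have ha := PySem.Int.floordiv_mul_add_mod a p
  have hb := PySem.Int.floordiv_mul_add_mod b p
  have hd : p ∣ PySem.Int.mod a p - PySem.Int.mod b p := by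
    have h2 : PySem.Int.mod a p - PySem.Int.mod b p
        = (a - b) - (PySem.Int.floordiv a p - PySem.Int.floordiv b p) * p := by ring_nf; omega
    rw [h2]
    exact dvd_sub h ⟨PySem.Int.floordiv a p - PySem.Int.floordiv b p, by ring⟩
  have hbounds : |PySem.Int.mod a p - PySem.Int.mod b p| < |p| := by
    rcases lt_or_gt_of_ne hp with hneg | hpos
    · have h1 := PySem.Int.mod_neg_bounds a hneg
      have h2 := PySem.Int.mod_neg_bounds b hneg
      rw [abs_sub_lt_iff]
      constructor <;> · have := abs_of_neg hneg; omega
    · have h1 := PySem.Int.mod_nonneg a hpos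
      have h2 := PySem.Int.mod_nonneg b hpos
      have h3 := PySem.Int.mod_lt a hpos
      have h4 := PySem.Int.mod_lt b hpos
      rw [abs_sub_lt_iff]
      have := abs_of_pos hpos; omega
  have := pvDvdBound hp hd hbounds
  omega

-- pvX p n = pow(2, n, p), the power-table entry
def pvX (p : Int) (n : Nat) : Int := PySem.Int.powMod 2 n p

theorem pvX_succ {p : Int} (hp : p ≠ 0) (n : Nat) :
    pvX p (n+1) = PySem.Int.mod (pvX p n * 2) p := by
  unfold pvX PySem.Int.powMod
  apply pvModCongr hp
  have h := PySem.Int.floordiv_mul_add_mod ((2:Int)^n) p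
  have h2 : (2:Int)^(n+1) - PySem.Int.mod ((2:Int)^n) p * 2
      = (PySem.Int.floordiv ((2:Int)^n) p * 2) * p := by ring_nf; omega
  rw [h2]
  exact ⟨PySem.Int.floordiv ((2:Int)^n) p * 2, by ring⟩

theorem pvX_periodic {p : Int} (hp : p ≠ 0) {s t : Nat} (ht : pvX p (s + t) = pvX p s) :
    ∀ n, s ≤ n → pvX p (n + t) = pvX p n := by
  intro n hn
  induction n, hn using Nat.le_induction with
  | base => exact ht
  | succ m hm ih =>
    have h1 : m + 1 + t = (m + t) + 1 := by omega
    rw [h1, pvX_succ hp, ih, ← pvX_succ hp]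

-- the unique a ≡ K (mod t) in [s, s+t) is s + (K-s) % t
theorem pvResClass {s t K a : Nat} (ht : 1 ≤ t) (hs : s ≤ a) (ha : a < s + t)
    (hK : s + t ≤ K) : t ∣ (K - a) ↔ a = s + (K - s) % t := by
  have hdm := Nat.div_add_mod (K - s) t
  set q := (K - s) / t with hq
  set r := (K - s) % t with hr
  have hrt : r < t := Nat.mod_lt _ (by omega)
  constructor
  · intro hd
    obtain ⟨ka, hka⟩ := hd
    have h1 : (K : Int) - s = t * q + r := by omega
    have h2 : (K : Int) - a = t * ka := by omega
    have h3 : (a : Int) - (s + r) = t * (q - ka) := by linear_combination h1 - h2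
    have h4 : (a : Int) - (s + r) = 0 := by
      apply pvDvdBound (p := (t : Int)) (by omega) ⟨q - ka, h3⟩
      rw [abs_lt]
      constructor <;> · simp [abs_of_nonneg]; omega
    omega
  · intro hd
    exact ⟨q, by omega⟩

theorem pvPer_reduce {f : Nat → Int} {s t : Nat} (ht1 : 1 ≤ t)
    (hper : ∀ n, s ≤ n → f (n + t) = f n) :
    ∀ n, s ≤ n → f n = f (s + (n - s) % t) := by
  intro n
  induction n using Nat.strong_induction_on with
  | _ n ih =>
    intro hn
    by_cases h : n < s + t
    · rw [Nat.mod_eq_of_lt (by omega)]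
      congr 1
      omega
    · have h2 : s ≤ n - t := by omega
      have h4 : (n - t) + t = n := by omega
      have hh := hper (n - t) h2
      rw [h4] at hh
      calc f n = f (n - t) := hh
        _ = f (s + (n - t - s) % t) := ih (n - t) (by omega) h2
        _ = f (s + (n - s) % t) := by
            congr 2
            have h5 : n - s = (n - t - s) + t := by omega
            rw [h5, Nat.add_mod_right]

-- ---- counter (Dict) increment lemmas ----

theorem pvInc_inc_same (d : PySem.Dict Int Int) (k m n : Int) :
    (d.modify k 0 (· + m)).modify k 0 (· + n) = d.modify k 0 (· + (m + n)) := by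
  unfold PySem.Dict.modify
  rw [PySem.Dict.insert_insert_self]
  congr 1
  have h : (d.insert k (d.getD k 0 + m)).getD k 0 = d.getD k 0 + m := by
    rw [PySem.Dict.getD_insert]; simp
  rw [h]; ring

theorem pvInsert_comm_of_contains (d : PySem.Dict Int Int) {k k' : Int} (hk : d.contains k = true)
    (hne : k ≠ k') (v v' : Int) :
    (d.insert k' v').insert k v = (d.insert k v).insert k' v' := by
  have hk2 : (d.insert k' v').contains k = true := by
    rw [PySem.Dict.contains_insert]; simp [hk]
  have hk4 : (d.insert k v).contains k' = d.contains k' := by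
    rw [PySem.Dict.contains_insert]; simp [Ne.symm hne]
  apply PySem.Dict.ext
  by_cases hk' : d.contains k' = true
  · rw [PySem.Dict.items_insert_of_contains _ _ hk2,
        PySem.Dict.items_insert_of_contains _ _ hk',
        PySem.Dict.items_insert_of_contains _ _ (hk4.trans hk'),
        PySem.Dict.items_insert_of_contains _ _ hk]
    simp only [List.map_map]
    apply List.map_congr_left
    intro q _
    by_cases h1 : q.1 = k' <;> by_cases h2 : q.1 = k <;>
      simp [Function.comp, h1, h2, hne, Ne.symm hne]
  · have hk'f : d.contains k' = false := by simpa using hk'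
    rw [PySem.Dict.items_insert_of_contains _ _ hk2,
        PySem.Dict.items_insert_of_not_contains _ _ hk'f,
        PySem.Dict.items_insert_of_not_contains _ _ (hk4.trans hk'f),
        PySem.Dict.items_insert_of_contains _ _ hk]
    rw [List.map_append]
    simp [Ne.symm hne]

theorem pvInc_comm (d : PySem.Dict Int Int) {k : Int} (hk : d.contains k = true) (k' m n : Int) :
    (d.modify k' 0 (· + n)).modify k 0 (· + m) = (d.modify k 0 (· + m)).modify k' 0 (· + n) := by
  by_cases he : k = k'
  · subst he
    rw [pvInc_inc_same, pvInc_inc_same]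
    congr 1
    funext x
    ring
  · unfold PySem.Dict.modify
    have h1 : (d.insert k' (d.getD k' 0 + n)).getD k 0 = d.getD k 0 := by
      rw [PySem.Dict.getD_insert]; simp [he]
    have h2 : (d.insert k (d.getD k 0 + m)).getD k' 0 = d.getD k' 0 := by
      rw [PySem.Dict.getD_insert]; simp [Ne.symm he]
    rw [h1, h2]
    exact pvInsert_comm_of_contains d hk he _ _

theorem pvInc_foldl_comm {α : Type} (l : List α) (key : α → Int) (mult : α → Int)
    (k v : Int) (d : PySem.Dict Int Int) (hk : d.contains k = true) :
    l.foldl (fun d a => d.modify (key a) 0 (· + mult a)) (d.modify k 0 (· + v))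
      = (l.foldl (fun d a => d.modify (key a) 0 (· + mult a)) d).modify k 0 (· + v) := by
  induction l generalizing d with
  | nil => rfl
  | cons b l ih =>
    simp only [List.foldl_cons]
    rw [← pvInc_comm d hk (key b) v (mult b), ih]
    rw [PySem.Dict.contains_modify]
    simp [hk]

-- bump: increasing one multiplicity (at j ∈ l, l nodup) = one extra increment afterwards
theorem pvBump {α : Type} [DecidableEq α] (l : List α) (hnd : l.Nodup) (key : α → Int)
    (mult mult' : α → Int) (j : α) (hj : j ∈ l)
    (hsame : ∀ a ∈ l, a ≠ j → mult' a = mult a) (hbump : mult' j = mult j + 1)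
    (d : PySem.Dict Int Int) :
    l.foldl (fun d a => d.modify (key a) 0 (· + mult' a)) d
      = (l.foldl (fun d a => d.modify (key a) 0 (· + mult a)) d).modify (key j) 0 (· + 1) := by
  induction l generalizing d with
  | nil => cases hj
  | cons b l ih =>
    simp only [List.foldl_cons]
    rcases List.mem_cons.mp hj with rfl | hjl
    · have hnotin : j ∉ l := (List.nodup_cons.mp hnd).1
      have hcongr : l.foldl (fun d a => d.modify (key a) 0 (· + mult' a))
            (d.modify (key j) 0 (· + mult' j))
          = l.foldl (fun d a => d.modify (key a) 0 (· + mult a))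
            (d.modify (key j) 0 (· + mult' j)) := by
        apply PySem.List.foldl_congr_mem
        intro acc x hx
        rw [hsame x (List.mem_cons_of_mem _ hx) (fun h => hnotin (h ▸ hx))]
      rw [hcongr, hbump, ← pvInc_inc_same d (key j) (mult j) 1]
      rw [pvInc_foldl_comm]
      rw [PySem.Dict.contains_modify]
      simp
    · have hbj : b ≠ j := fun h => (List.nodup_cons.mp hnd).1 (h ▸ hjl)
      rw [hsame b (List.mem_cons_self ..) hbj]
      exact ih (List.nodup_cons.mp hnd).2 hjl
        (fun a ha h => hsame a (List.mem_cons_of_mem _ ha) h) (d.modify (key b) 0 (· + mult b))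

def pvMult (s t K : Nat) (a : Nat) : Int :=
  if s ≤ a then (((K - a) / t : Nat) : Int) + 1 else 1

-- the per-delta core: counting every a in [0,K] once = counting the first min(K,s+t-1)+1
-- of them with whole-residue-class multiplicities
theorem pvPD (key : Nat → Int) (s t : Nat) (ht : 1 ≤ t)
    (hper : ∀ n, s ≤ n → key (n + t) = key n) :
    ∀ K (d : PySem.Dict Int Int),
      (List.range (K+1)).foldl (fun d a => d.modify (key a) 0 (· + 1)) d
      = (List.range (min K (s+t-1) + 1)).foldl
          (fun d a => d.modify (key a) 0 (· + pvMult s t K a)) d := by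
  intro K
  induction K using Nat.strong_induction_on with
  | _ K ih =>
    intro d
    by_cases hK : K ≤ s + t - 1
    · rw [min_eq_left hK]
      apply PySem.List.foldl_congr_mem
      intro acc a haK
      rw [List.mem_range] at haK
      have hm : pvMult s t K a = 1 := by
        unfold pvMult
        split
        · rw [Nat.div_eq_of_lt (by omega)]
          norm_num
        · rfl
      rw [hm]
    · have hKst : s + t ≤ K := by omega
      set j := s + (K - s) % t with hj
      have hjlt : j < s + t := by
        have := Nat.mod_lt (K - s) (y := t) (by omega)
        omega
      have hjs : s ≤ j := by omega
      rw [List.range_succ, List.foldl_append, List.foldl_cons, List.foldl_nil]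
      have hKpred : K - 1 + 1 = K := by omega
      have ihK := ih (K - 1) (by omega) d
      rw [hKpred] at ihK
      rw [ihK]
      have hkey : key K = key j := by
        rw [pvPer_reduce ht hper K (by omega), hj]
      rw [hkey]
      have hminK : min K (s+t-1) + 1 = s + t := by omega
      have hminK1 : min (K-1) (s+t-1) + 1 = s + t := by omega
      rw [hminK] at *
      rw [hminK1]
      rw [pvBump (List.range (s+t)) (List.nodup_range) key
        (fun a => pvMult s t (K-1) a) (fun a => pvMult s t K a) j
        (by rw [List.mem_range]; omega) ?_ ?_ d]
      · intro a ha hne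
        rw [List.mem_range] at ha
        unfold pvMult
        dsimp only
        split
        · rename_i hsa
          have hnd : ¬ t ∣ (K - a) := by
            intro hdvd
            exact hne ((pvResClass ht hsa ha hKst).mp hdvd)
          have h6 : (K - a) = (K - 1 - a) + 1 := by omega
          rw [h6, Nat.succ_div, if_neg (by rw [← h6]; exact hnd)]
          norm_num
        · rfl
      · unfold pvMult
        dsimp only
        rw [if_pos hjs, if_pos hjs]
        have hdvd : t ∣ (K - j) := (pvResClass ht hjs hjlt hKst).mpr rfl
        have h2 : (K - j) = (K - 1 - j) + 1 := by omega
        rw [h2] at hdvd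
        rw [h2, Nat.succ_div, if_pos hdvd]
        push_cast
        ring

-- ---- the cycle-detection loop of B, named for the proofs (rfl-equal to the port's lambda) ----

def pvF (p : Int) : (List Int × PySem.Dict Int Int × Int × Option (Int × Int)) → Int →
    (List Int × PySem.Dict Int Int × Int × Option (Int × Int)) :=
  fun stt a =>
    let P := stt.1; let first := stt.2.1; let x := stt.2.2.1; let st := stt.2.2.2
    if st.isSome then stt
    else match first.get? x with
      | some s => (P, first, x, some (s, a - s))
      | none => (P ++ [x], first.insert x a, PySem.Int.mod (x * 2) p, none)

def pvInit (p : Int) : List Int × PySem.Dict Int Int × Int × Option (Int × Int) :=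
  (([] : List Int), (PySem.Dict.empty : PySem.Dict Int Int), PySem.Int.mod 1 p,
    (none : Option (Int × Int)))

def pvDetInv (p : Int) (n : Nat)
    (stt : List Int × PySem.Dict Int Int × Int × Option (Int × Int)) : Prop :=
  (∀ i, i < stt.1.length → stt.1.getD i 0 = pvX p i) ∧
  (∀ v s, stt.2.1.get? v = some s →
      ∃ sn : Nat, s = (sn:Int) ∧ sn < stt.1.length ∧ stt.1.getD sn 0 = v) ∧
  (match stt.2.2.2 with
   | none => stt.1.length = n ∧ stt.2.2.1 = pvX p stt.1.length
   | some (s, t) => ∃ sn tn : Nat, s = (sn:Int) ∧ t = (tn:Int) ∧ sn + tn = stt.1.length ∧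
      1 ≤ tn ∧ pvX p stt.1.length = pvX p sn)

theorem pvDet_step (p : Int) (hp : p ≠ 0) (n : Nat)
    (stt : List Int × PySem.Dict Int Int × Int × Option (Int × Int))
    (h : pvDetInv p n stt) : pvDetInv p (n+1) (pvF p stt (n:Int)) := by
  obtain ⟨P, first, x, st⟩ := stt
  obtain ⟨hP, hF, hst⟩ := h
  dsimp only at hP hF hst
  cases st with
  | some s => exact ⟨hP, hF, hst⟩
  | none =>
    obtain ⟨hlen, hx⟩ := hst
    simp only [pvF, Option.isSome_none, Bool.false_eq_true, if_false]
    cases hfx : first.get? x with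
    | some s =>
      dsimp only
      refine ⟨hP, hF, ?_⟩
      obtain ⟨sn, rfl, hsn, hgd⟩ := hF x s hfx
      have hsnn : sn < n := by rw [← hlen]; exact hsn
      refine ⟨sn, n - sn, rfl, by push_cast [Nat.cast_sub (le_of_lt hsnn)]; ring,
        by dsimp only; omega, by omega, ?_⟩
      rw [hlen] at hx ⊢
      rw [← hx, ← (hP sn hsn), hgd]
    | none =>
      dsimp only
      refine ⟨?_, ?_, ?_⟩
      · intro i hi
        simp only [List.length_append, List.length_cons, List.length_nil] at hi
        rcases lt_or_ge i P.length with hlt | hge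
        · rw [List.getD_append _ _ _ _ hlt]
          exact hP i hlt
        · have hieq : i = P.length := by omega
          subst hieq
          have hone : (P ++ [x]).getD P.length 0 = x := by simp [List.getD]
          rw [hone, hx]
      · intro v s hv
        rw [PySem.Dict.get?_insert] at hv
        split at hv
        · rename_i hvx
          subst hvx
          obtain rfl : s = (n : Int) := by simpa using hv.symm
          refine ⟨n, rfl, by simp [hlen], ?_⟩
          rw [← hlen]
          simp [List.getD]
        · obtain ⟨sn, rfl, hsn, hgd⟩ := hF v s hv
          refine ⟨sn, rfl, by simp only [List.length_append] at *; simp at hsn ⊢; omega, ?_⟩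
          rw [List.getD_append _ _ _ _ hsn]
          exact hgd
      · dsimp only
        refine ⟨by simp [hlen], ?_⟩
        simp only [List.length_append, List.length_cons, List.length_nil]
        rw [hlen] at hx
        rw [hx, ← pvX_succ hp]
        congr 1
        omega

theorem pvDet_inv (p : Int) (hp : p ≠ 0) (n : Nat) :
    pvDetInv p n ((PySem.List.pyRange 0 (n:Int) 1).foldl (pvF p) (pvInit p)) := by
  induction n with
  | zero =>
    rw [PySem.List.pyRange_one_eq_nil (by omega)]
    refine ⟨by simp [pvInit], by simp [pvInit, PySem.Dict.get?_empty], by simp [pvInit]; rfl⟩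
  | succ n ih =>
    have hc : ((n+1 : Nat) : Int) = (n : Int) + 1 := by push_cast; ring
    rw [hc, PySem.List.pyRange_one_succ_right (by omega), List.foldl_append, List.foldl_cons,
      List.foldl_nil]
    exact pvDet_step p hp n _ ih

-- ---- bridges and named pieces of the two ports ----

theorem pvFoldRange {β : Type} (f : β → Int → β) (n : Nat) (d : β) :
    (PySem.List.pyRange 0 (n:Int) 1).foldl f d = (List.range n).foldl (fun d (k : Nat) => f d (k:Int)) d := by
  rw [PySem.List.pyRange_one]
  have h : ((n:Int) - 0).toNat = n := by omega
  rw [h, List.foldl_map]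
  apply PySem.List.foldl_congr_mem
  intro acc x _
  simp only [zero_add]

def pvCountA (M g p : Int) : PySem.Dict Int Int :=
  (PySem.List.pyRange 0 (M+1) 1).foldl (fun Nr delta =>
      let c := PySem.Int.mod (1 + g * PySem.Int.powMod 2 delta.toNat p) p
      if c == 0 then
        Nr.modify 0 0 (· + (M - delta + 1))
      else
        (PySem.List.pyRange 0 (M - delta + 1) 1).foldl
          (fun Nr a => Nr.modify (PySem.Int.mod (PySem.Int.powMod 2 a.toNat p * c) p) 0 (· + 1)) Nr)
    (PySem.Dict.empty : PySem.Dict Int Int)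

def pvRes (M p : Int) : List Int × PySem.Dict Int Int × Int × Option (Int × Int) :=
  (PySem.List.pyRange 0 (M+1) 1).foldl (pvF p) (pvInit p)

def pvCountB (M g p : Int) (P : List Int) (st : Option (Int × Int)) : PySem.Dict Int Int :=
  (PySem.List.pyRange 0 (M+1) 1).foldl (fun Nr delta =>
      let c1 := if delta < PySem.List.len P then PySem.List.pyGetD P delta 0
                else match st with
                  | some st' => PySem.List.pyGetD P (st'.1 + PySem.Int.mod (delta - st'.1) st'.2) 0
                  | none => 0
      let c := PySem.Int.mod (1 + g * c1) p
      let K := M - delta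
      if c == 0 then Nr.modify 0 0 (· + K + 1)
      else
        let J := min K (PySem.List.len P - 1)
        match st with
        | none =>
          (PySem.List.pyRange 0 (J + 1) 1).foldl (fun Nr a =>
            Nr.modify (PySem.Int.mod (PySem.List.pyGetD P a 0 * c) p) 0 (· + 1)) Nr
        | some st' =>
          let Nr1 := (PySem.List.pyRange 0 (min (J + 1) st'.1) 1).foldl (fun Nr a =>
            Nr.modify (PySem.Int.mod (PySem.List.pyGetD P a 0 * c) p) 0 (· + 1)) Nr
          (PySem.List.pyRange st'.1 (J + 1) 1).foldl (fun Nr a =>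
            Nr.modify (PySem.Int.mod (PySem.List.pyGetD P a 0 * c) p) 0
              (· + PySem.Int.floordiv (K - a) st'.2 + 1)) Nr1)
    (PySem.Dict.empty : PySem.Dict Int Int)

theorem pvA_eq (M g p : Int) : compute_Nr_via_delta M g p = (pvCountA M g p).items := rfl

theorem pvB_eq (M g p : Int) : compute_Nr_via_delta_alt M g p
    = if M < 0 then [] else (pvCountB M g p (pvRes M p).1 (pvRes M p).2.2.2).items := rfl


theorem pvIfCongr {C : Prop} [Decidable C] {X1 X2 Y1 Y2 : PySem.Dict Int Int}
    (hX : X1 = X2) (hY : Y1 = Y2) :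
    (if C then X1 else Y1) = (if C then X2 else Y2) := by rw [hX, hY]

-- inner fold, cycle case: A's inner loop = B's two-phase multiplicity loops
theorem pvInnerCycle (p c : Int) (P : List Int) (sn tn Kn : Nat)
    (hlen : sn + tn = P.length) (ht : 1 ≤ tn)
    (hgd : ∀ i, i < P.length → P.getD i 0 = pvX p i)
    (hper : ∀ n, sn ≤ n → pvX p (n + tn) = pvX p n)
    (acc : PySem.Dict Int Int) :
    (PySem.List.pyRange 0 ((Kn:Int) + 1) 1).foldl
        (fun Nr a => Nr.modify (PySem.Int.mod (PySem.Int.powMod 2 a.toNat p * c) p) 0 (· + 1)) acc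
    = (PySem.List.pyRange (sn:Int) (min (Kn:Int) ((P.length:Int) - 1) + 1) 1).foldl
        (fun Nr a => Nr.modify (PySem.Int.mod (PySem.List.pyGetD P a 0 * c) p) 0
          (· + PySem.Int.floordiv ((Kn:Int) - a) (tn:Int) + 1))
        ((PySem.List.pyRange 0 (min (min (Kn:Int) ((P.length:Int) - 1) + 1) (sn:Int)) 1).foldl
          (fun Nr a => Nr.modify (PySem.Int.mod (PySem.List.pyGetD P a 0 * c) p) 0 (· + 1)) acc) := by
  have hkeyper : ∀ n, sn ≤ n →
      PySem.Int.mod (pvX p (n + tn) * c) p = PySem.Int.mod (pvX p n * c) p := by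
    intro n hn
    rw [hper n hn]
  have hL : ((Kn:Int) + 1) = ((Kn + 1 : Nat) : Int) := by push_cast; ring
  rw [hL, pvFoldRange]
  have hcl : (List.range (Kn+1)).foldl
        (fun d (k : Nat) => d.modify (PySem.Int.mod (PySem.Int.powMod 2 ((k:Int)).toNat p * c) p) 0 (· + 1)) acc
      = (List.range (Kn+1)).foldl
        (fun d (k : Nat) => d.modify (PySem.Int.mod (pvX p k * c) p) 0 (· + 1)) acc := by
    apply PySem.List.foldl_congr_mem
    intro a x _
    simp [pvX]
  rw [hcl, pvPD (fun n => PySem.Int.mod (pvX p n * c) p) sn tn ht hkeyper Kn acc]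
  set J' := min Kn (sn + tn - 1) with hJ'
  have hminJ : min (Kn:Int) ((P.length:Int) - 1) + 1 = ((J' + 1 : Nat) : Int) := by
    push_cast
    omega
  rw [hminJ]
  by_cases hc2 : sn ≤ J'
  · have hmin1 : min (((J' + 1 : Nat) : Int)) (sn:Int) = ((sn:Nat):Int) := by
      push_cast
      omega
    rw [hmin1, pvFoldRange, PySem.List.pyRange_one (sn:Int) ((J'+1 : Nat):Int)]
    have hcnt : ((((J'+1:Nat)):Int) - (sn:Int)).toNat = J' + 1 - sn := by omega
    rw [hcnt, List.foldl_map]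
    rw [show List.range (J' + 1) = List.range sn ++ (List.range (J' + 1 - sn)).map (sn + ·) from
      by rw [← List.range_add]; congr 1; omega]
    rw [List.foldl_append, List.foldl_map]
    have hpre : (List.range sn).foldl
          (fun d (a : Nat) => d.modify (PySem.Int.mod (pvX p a * c) p) 0 (· + pvMult sn tn Kn a)) acc
        = (List.range sn).foldl
          (fun d (k : Nat) => d.modify (PySem.Int.mod (PySem.List.pyGetD P ((k:Nat):Int) 0 * c) p) 0 (· + 1)) acc := by
      apply PySem.List.foldl_congr_mem
      intro d a ha
      rw [List.mem_range] at ha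
      rw [PySem.List.pyGetD_natCast, hgd a (by omega)]
      congr 1
      unfold pvMult
      rw [if_neg (by omega)]
    rw [hpre]
    apply PySem.List.foldl_congr_mem
    intro d k hk
    rw [List.mem_range] at hk
    have hcast : (sn:Int) + (k:Int) = ((sn + k : Nat) : Int) := by push_cast; ring
    rw [hcast, PySem.List.pyGetD_natCast, hgd (sn + k) (by omega)]
    congr 1
    funext x
    unfold pvMult
    rw [if_pos (by omega)]
    have hsub : (Kn:Int) - ((sn + k : Nat) : Int) = ((Kn - (sn + k) : Nat) : Int) := by omega
    rw [hsub, PySem.Int.floordiv_natCast]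
    ring
  · have hmin1 : min (((J' + 1 : Nat) : Int)) (sn:Int) = ((J'+1 : Nat):Int) := by
      push_cast
      omega
    rw [hmin1, PySem.List.pyRange_one_eq_nil (show ((J'+1:Nat):Int) ≤ (sn:Int) by omega),
      List.foldl_nil, pvFoldRange]
    apply PySem.List.foldl_congr_mem
    intro d a ha
    rw [List.mem_range] at ha
    rw [PySem.List.pyGetD_natCast, hgd a (by omega)]
    congr 1
    unfold pvMult
    rw [if_neg (by omega)]

-- inner fold, no-cycle case: the two loops run over the same range with multiplicity 1
theorem pvInnerNone (p c : Int) (P : List Int) (Kn : Nat) (hKn : Kn < P.length)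
    (hgd : ∀ i, i < P.length → P.getD i 0 = pvX p i)
    (acc : PySem.Dict Int Int) :
    (PySem.List.pyRange 0 ((Kn:Int) + 1) 1).foldl
        (fun Nr a => Nr.modify (PySem.Int.mod (PySem.Int.powMod 2 a.toNat p * c) p) 0 (· + 1)) acc
    = (PySem.List.pyRange 0 (min (Kn:Int) ((P.length:Int) - 1) + 1) 1).foldl
        (fun Nr a => Nr.modify (PySem.Int.mod (PySem.List.pyGetD P a 0 * c) p) 0 (· + 1)) acc := by
  have hmin : min (Kn:Int) ((P.length:Int) - 1) + 1 = (Kn:Int) + 1 := by omega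
  rw [hmin]
  have hL : ((Kn:Int) + 1) = ((Kn + 1 : Nat) : Int) := by push_cast; ring
  rw [hL, pvFoldRange, pvFoldRange]
  apply PySem.List.foldl_congr_mem
  intro d x hx
  rw [List.mem_range] at hx
  have hgx : PySem.List.pyGetD P ((x:Nat):Int) 0 = pvX p x := by
    rw [PySem.List.pyGetD_natCast]
    exact hgd x (by omega)
  rw [hgx]
  simp [pvX]

-- ===== VERDICT (by name: the statement is the Claim_ definition above) =====
theorem compute_Nr_via_delta_spec : Claim_equal_compute_Nr_via_delta := by
  unfold Claim_equal_compute_Nr_via_delta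
  intro M g p _hdom hpre
  unfold Spec_compute_Nr_via_delta
  rw [pvA_eq, pvB_eq]
  by_cases hM : M < 0
  · rw [if_pos hM]
    unfold pvCountA
    rw [PySem.List.pyRange_one_eq_nil (by omega)]
    rfl
  · have hp : p ≠ 0 := by
      rcases hpre with h | h
      · omega
      · exact h
    rw [if_neg hM]
    set N := M.toNat + 1 with hN
    have hMN : M + 1 = (N : Int) := by omega
    have hdet : pvDetInv p N (pvRes M p) := by
      unfold pvRes
      rw [hMN]
      exact pvDet_inv p hp N
    obtain ⟨hP, hF, hst⟩ := hdet
    congr 1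
    unfold pvCountA pvCountB
    rw [hMN, pvFoldRange, pvFoldRange]
    apply PySem.List.foldl_congr_mem
    intro acc dn hdn
    rw [List.mem_range] at hdn
    have hdM : dn ≤ M.toNat := by omega
    simp only [Int.toNat_natCast]
    have hKcast : M - (dn:Int) = ((M.toNat - dn : Nat) : Int) := by omega
    cases hstc : (pvRes M p).2.2.2 with
    | none =>
      rw [hstc] at hst
      obtain ⟨hlen, -⟩ := hst
      dsimp only
      have hc1 : (if (dn:Int) < PySem.List.len (pvRes M p).1
            then PySem.List.pyGetD (pvRes M p).1 ((dn:Nat):Int) 0 else (0:Int))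
          = PySem.Int.powMod 2 dn p := by
        have hdlt : dn < (pvRes M p).1.length := by omega
        rw [if_pos (by simp only [PySem.List.len_eq]; exact_mod_cast hdlt)]
        rw [PySem.List.pyGetD_natCast]
        exact hP dn hdlt
      rw [hc1, PySem.List.len_eq, hKcast]
      exact pvIfCongr (by congr 1; funext x; ring)
        (pvInnerNone p _ (pvRes M p).1 (M.toNat - dn) (by omega) hP acc)
    | some st' =>
      rw [hstc] at hst
      obtain ⟨st1, st2⟩ := st'
      obtain ⟨sn, tn, h1, h2, hlen, ht, hXL⟩ := hst
      subst h1 h2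
      rw [← hlen] at hXL
      have hper := pvX_periodic hp hXL
      dsimp only
      have hc1 : (if (dn:Int) < PySem.List.len (pvRes M p).1
            then PySem.List.pyGetD (pvRes M p).1 ((dn:Nat):Int) 0
            else PySem.List.pyGetD (pvRes M p).1
              ((sn:Int) + PySem.Int.mod ((dn:Int) - (sn:Int)) (tn:Int)) 0)
          = PySem.Int.powMod 2 dn p := by
        by_cases hdL : dn < (pvRes M p).1.length
        · rw [if_pos (by simp only [PySem.List.len_eq]; exact_mod_cast hdL)]
          rw [PySem.List.pyGetD_natCast]
          exact hP dn hdL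
        · rw [if_neg (by simp only [PySem.List.len_eq]; exact_mod_cast hdL)]
          have hsd : sn ≤ dn := by omega
          have hcastm : (sn:Int) + PySem.Int.mod ((dn:Int) - (sn:Int)) (tn:Int)
              = ((sn + (dn - sn) % tn : Nat) : Int) := by
            have hsub : (dn:Int) - (sn:Int) = ((dn - sn : Nat) : Int) := by omega
            rw [hsub, PySem.Int.mod_natCast]
            push_cast
            ring
          rw [hcastm, PySem.List.pyGetD_natCast]
          have hidx : sn + (dn - sn) % tn < (pvRes M p).1.length := by
            have := Nat.mod_lt (dn - sn) (y := tn) (by omega)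
            omega
          rw [hP _ hidx]
          exact (pvPer_reduce ht hper dn hsd).symm
      rw [hc1, PySem.List.len_eq, hKcast]
      exact pvIfCongr (by congr 1; funext x; ring)
        (pvInnerCycle p _ (pvRes M p).1 sn tn (M.toNat - dn) hlen ht hP hper acc)
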